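-- pv_equiv track=rewrite | github.com/b-erdem/rekit | src/rekit/schemadiff/analyzer.py | _suggest_python_type
-- ===== SOURCE A (Python) =====
-- from typing import Any, Dict, List, Optional, Set, Tuple
--
-- _TYPE_TO_PYTHON = {
--     "object": "Dict[str, Any]",
--     "array": "List[Any]",
--     "float": "float",
--     "integer": "int",
--     "date": "str",  # ISO date strings stay as str
--     "url": "str",
--     "email": "str",
--     "uuid": "str",
--     "string": "str",
--     "boolean": "bool",
--     "null": "None",
--     "mixed": "Any",
-- }
--
-- def _suggest_python_type(types_seen: Set[str]) -> str:
--     """Suggest a single Python type annotation from a set of observed types.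
--
--     Rules:
--       - If only ``null`` is seen, return ``"None"``.
--       - Ignore ``null`` otherwise (fields with null become Optional).
--       - ``int`` + ``float`` -> ``float``.
--       - String subtypes (date, url, email, uuid) collapse to ``str``.
--       - Multiple incompatible types -> ``Any``.
--     """
--     real = types_seen - {"null"}
--     if not real:
--         return "None"
--
--     # Collapse string subtypes
--     string_types = {"string", "date", "url", "email", "uuid"}
--     real_collapsed: Set[str] = set()
--     has_string = False
--     for t in real:
--         if t in string_types:
--             has_string = True
--         else:
--             real_collapsed.add(t)
--     if has_string:
--         real_collapsed.add("string")
--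
--     # int + float -> float
--     if real_collapsed == {"integer", "float"}:
--         return "float"
--     if real_collapsed == {"integer"}:
--         return "int"
--     if real_collapsed == {"float"}:
--         return "float"
--
--     if len(real_collapsed) == 1:
--         return _TYPE_TO_PYTHON.get(next(iter(real_collapsed)), "Any")
--
--     return "Any"
-- ===== SOURCE B (Python) =====
-- _TYPE_TO_PYTHON = {
--     "object": "Dict[str, Any]",
--     "array": "List[Any]",
--     "float": "float",
--     "integer": "int",
--     "date": "str",
--     "url": "str",
--     "email": "str",
--     "uuid": "str",
--     "string": "str",
--     "boolean": "bool",
--     "null": "None",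
--     "mixed": "Any",
-- }
--
-- def _suggest_python_type(types_seen):
--     real = types_seen - {"null"}
--     if not real:
--         return "None"
--     mapped = {_TYPE_TO_PYTHON.get(t, "Any") for t in real}
--     if mapped == {"int", "float"}:
--         return "float"
--     if len(mapped) == 1:
--         return next(iter(mapped))
--     return "Any"
-- ===== Notes on version B (the rewrite author's own statement) =====
-- stated objective: simpler
-- what changed: Instead of collapsing string subtypes into a 'string' marker set with a has_string flag and then testing four special category-set cases, B maps every non-null type straight to its Python annotation in one pass and classifies the resulting annotation set with just two cases ({'int','float'} and singleton).
import Mathlib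
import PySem

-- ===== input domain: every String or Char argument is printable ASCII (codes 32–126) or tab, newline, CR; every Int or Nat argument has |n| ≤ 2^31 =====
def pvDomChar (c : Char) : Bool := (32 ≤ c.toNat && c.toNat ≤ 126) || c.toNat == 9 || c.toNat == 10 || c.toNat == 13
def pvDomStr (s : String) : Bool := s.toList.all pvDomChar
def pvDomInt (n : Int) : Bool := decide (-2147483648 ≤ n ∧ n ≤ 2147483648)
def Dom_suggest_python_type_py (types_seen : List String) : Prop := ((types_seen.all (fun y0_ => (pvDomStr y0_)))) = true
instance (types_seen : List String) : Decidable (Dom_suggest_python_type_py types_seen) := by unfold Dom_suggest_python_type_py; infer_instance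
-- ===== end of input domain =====

-- B replaces A's collapse-string-subtypes-then-classify-categories scheme by mapping every
-- non-null type straight to its Python annotation and classifying the annotation set (simpler).

-- _TYPE_TO_PYTHON, module-level constant shared by both implementations
def pvTypeToPython : PySem.Dict String String := PySem.Dict.ofList
  [("object","Dict[str, Any]"),("array","List[Any]"),("float","float"),("integer","int"),
   ("date","str"),("url","str"),("email","str"),("uuid","str"),("string","str"),
   ("boolean","bool"),("null","None"),("mixed","Any")]

-- ===== PORT A =====
-- string_types = {"string", "date", "url", "email", "uuid"}
def pvStringTypes : PySem.Set String := PySem.Set.ofList ["string","date","url","email","uuid"]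

def suggest_python_type_py (types_seen : List String) : String :=
  -- real = types_seen - {"null"}
  let real : PySem.Set String :=
    PySem.Set.diff (PySem.Set.ofList types_seen) (PySem.Set.ofList ["null"])
  if real = [] then "None"
  else
    -- for t in real: if t in string_types: has_string = True else real_collapsed.add(t)
    let st := real.foldl (fun (acc : PySem.Set String × Bool) t =>
        if pvStringTypes.contains t then (acc.1, true) else (PySem.Set.add acc.1 t, acc.2))
      (PySem.Set.empty, false)
    -- if has_string: real_collapsed.add("string")
    let collapsed : PySem.Set String := if st.2 then PySem.Set.add st.1 "string" else st.1
    if PySem.Set.equal collapsed (PySem.Set.ofList ["integer","float"]) then "float"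
    else if PySem.Set.equal collapsed (PySem.Set.ofList ["integer"]) then "int"
    else if PySem.Set.equal collapsed (PySem.Set.ofList ["float"]) then "float"
    -- len(real_collapsed) == 1: next(iter(...)) is the single element
    else if PySem.Set.len collapsed = 1 then pvTypeToPython.getD (collapsed.headD "") "Any"
    else "Any"

-- ===== PORT B =====
def suggest_python_type_py_alt (types_seen : List String) : String :=
  -- real = types_seen - {"null"}
  let real : PySem.Set String :=
    PySem.Set.diff (PySem.Set.ofList types_seen) (PySem.Set.ofList ["null"])
  if real = [] then "None"
  else
    -- mapped = {_TYPE_TO_PYTHON.get(t, "Any") for t in real}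
    let mapped : PySem.Set String :=
      real.foldl (fun s t => PySem.Set.add s (pvTypeToPython.getD t "Any")) PySem.Set.empty
    if PySem.Set.equal mapped (PySem.Set.ofList ["int","float"]) then "float"
    else if PySem.Set.len mapped = 1 then mapped.headD ""
    else "Any"

-- ===== PRECONDITION & SPEC =====
def Spec_suggest_python_type_py (types_seen : List String) (out : String) : Prop := out = suggest_python_type_py_alt types_seen
instance (types_seen : List String) (out : String) : Decidable (Spec_suggest_python_type_py types_seen out) := by unfold Spec_suggest_python_type_py; infer_instance

-- ===== CLAIM (what is proved, stated in full; the proofs are below) =====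
def Claim_equal_suggest_python_type_py : Prop := ∀ (types_seen : List String), Dom_suggest_python_type_py types_seen → Spec_suggest_python_type_py types_seen (suggest_python_type_py types_seen)

-- ===== LEMMAS AND PROOFS =====

theorem F_default (u : String) (h1 : "object" ≠ u) (h2 : "array" ≠ u) (h3 : "float" ≠ u)
    (h4 : "integer" ≠ u) (h5 : "date" ≠ u) (h6 : "url" ≠ u) (h7 : "email" ≠ u)
    (h8 : "uuid" ≠ u) (h9 : "string" ≠ u) (h10 : "boolean" ≠ u) (h11 : "null" ≠ u)
    (h12 : "mixed" ≠ u) : pvTypeToPython.getD u "Any" = "Any" := by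
  have hmk : pvTypeToPython = PySem.Dict.mk
    [("object","Dict[str, Any]"),("array","List[Any]"),("float","float"),("integer","int"),
     ("date","str"),("url","str"),("email","str"),("uuid","str"),("string","str"),
     ("boolean","bool"),("null","None"),("mixed","Any")] := by decide
  rw [hmk, PySem.Dict.getD_eq_get?_getD]
  simp only [PySem.Dict.get?_mk_cons, beq_iff_eq, if_neg h1, if_neg h2, if_neg h3, if_neg h4,
    if_neg h5, if_neg h6, if_neg h7, if_neg h8, if_neg h9, if_neg h10, if_neg h11, if_neg h12]
  rfl

-- the full case analysis of _TYPE_TO_PYTHON.get(u, "Any")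
theorem F_cases (u : String) : pvTypeToPython.getD u "Any" = "Any"
    ∨ (pvTypeToPython.getD u "Any" = "Dict[str, Any]" ∧ u = "object")
    ∨ (pvTypeToPython.getD u "Any" = "List[Any]" ∧ u = "array")
    ∨ (pvTypeToPython.getD u "Any" = "float" ∧ u = "float")
    ∨ (pvTypeToPython.getD u "Any" = "int" ∧ u = "integer")
    ∨ (pvTypeToPython.getD u "Any" = "str" ∧ u ∈ ["string","date","url","email","uuid"])
    ∨ (pvTypeToPython.getD u "Any" = "bool" ∧ u = "boolean")
    ∨ (pvTypeToPython.getD u "Any" = "None" ∧ u = "null") := by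
  rcases eq_or_ne "object" u with rfl|h1
  · exact Or.inr (Or.inl ⟨by decide, rfl⟩)
  rcases eq_or_ne "array" u with rfl|h2
  · exact Or.inr (Or.inr (Or.inl ⟨by decide, rfl⟩))
  rcases eq_or_ne "float" u with rfl|h3
  · exact Or.inr (Or.inr (Or.inr (Or.inl ⟨by decide, rfl⟩)))
  rcases eq_or_ne "integer" u with rfl|h4
  · exact Or.inr (Or.inr (Or.inr (Or.inr (Or.inl ⟨by decide, rfl⟩))))
  rcases eq_or_ne "date" u with rfl|h5
  · exact Or.inr (Or.inr (Or.inr (Or.inr (Or.inr (Or.inl ⟨by decide, by decide⟩)))))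
  rcases eq_or_ne "url" u with rfl|h6
  · exact Or.inr (Or.inr (Or.inr (Or.inr (Or.inr (Or.inl ⟨by decide, by decide⟩)))))
  rcases eq_or_ne "email" u with rfl|h7
  · exact Or.inr (Or.inr (Or.inr (Or.inr (Or.inr (Or.inl ⟨by decide, by decide⟩)))))
  rcases eq_or_ne "uuid" u with rfl|h8
  · exact Or.inr (Or.inr (Or.inr (Or.inr (Or.inr (Or.inl ⟨by decide, by decide⟩)))))
  rcases eq_or_ne "string" u with rfl|h9
  · exact Or.inr (Or.inr (Or.inr (Or.inr (Or.inr (Or.inl ⟨by decide, by decide⟩)))))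
  rcases eq_or_ne "boolean" u with rfl|h10
  · exact Or.inr (Or.inr (Or.inr (Or.inr (Or.inr (Or.inr (Or.inl ⟨by decide, rfl⟩))))))
  rcases eq_or_ne "null" u with rfl|h11
  · exact Or.inr (Or.inr (Or.inr (Or.inr (Or.inr (Or.inr (Or.inr ⟨by decide, rfl⟩))))))
  rcases eq_or_ne "mixed" u with rfl|h12
  · exact Or.inl (by decide)
  exact Or.inl (F_default u h1 h2 h3 h4 h5 h6 h7 h8 h9 h10 h11 h12)

theorem strlike_iff (u : String) :
    pvStringTypes.contains u = true ↔ u ∈ (["string","date","url","email","uuid"] : List String) := by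
  have h : pvStringTypes = ["string","date","url","email","uuid"] := by decide
  rw [h]
  exact PySem.Set.contains_iff _ _

theorem F_str (u : String) (h : u ∈ (["string","date","url","email","uuid"] : List String)) :
    pvTypeToPython.getD u "Any" = "str" := by
  simp only [List.mem_cons] at h
  rcases h with rfl|rfl|rfl|rfl|rfl|h <;> first | decide | exact absurd h (by simp)

theorem F_int_inv (u : String) (h : pvTypeToPython.getD u "Any" = "int") : u = "integer" := by
  rcases F_cases u with hc|hc|hc|hc|hc|hc|hc|hc
  · exact absurd (hc.symm.trans h) (by decide)
  · exact absurd (hc.1.symm.trans h) (by decide)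
  · exact absurd (hc.1.symm.trans h) (by decide)
  · exact absurd (hc.1.symm.trans h) (by decide)
  · exact hc.2
  · exact absurd (hc.1.symm.trans h) (by decide)
  · exact absurd (hc.1.symm.trans h) (by decide)
  · exact absurd (hc.1.symm.trans h) (by decide)

theorem F_float_inv (u : String) (h : pvTypeToPython.getD u "Any" = "float") : u = "float" := by
  rcases F_cases u with hc|hc|hc|hc|hc|hc|hc|hc
  · exact absurd (hc.symm.trans h) (by decide)
  · exact absurd (hc.1.symm.trans h) (by decide)
  · exact absurd (hc.1.symm.trans h) (by decide)
  · exact hc.2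
  · exact absurd (hc.1.symm.trans h) (by decide)
  · exact absurd (hc.1.symm.trans h) (by decide)
  · exact absurd (hc.1.symm.trans h) (by decide)
  · exact absurd (hc.1.symm.trans h) (by decide)

theorem F_str_inv (u : String) (h : pvTypeToPython.getD u "Any" = "str") :
    u ∈ (["string","date","url","email","uuid"] : List String) := by
  rcases F_cases u with hc|hc|hc|hc|hc|hc|hc|hc
  · exact absurd (hc.symm.trans h) (by decide)
  · exact absurd (hc.1.symm.trans h) (by decide)
  · exact absurd (hc.1.symm.trans h) (by decide)
  · exact absurd (hc.1.symm.trans h) (by decide)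
  · exact absurd (hc.1.symm.trans h) (by decide)
  · exact hc.2
  · exact absurd (hc.1.symm.trans h) (by decide)
  · exact absurd (hc.1.symm.trans h) (by decide)

-- a collapsed-set element that is a string subtype must be "string" itself
theorem valid_str (u : String) (hu : u = "string" ∨ pvStringTypes.contains u = false)
    (hm : u ∈ (["string","date","url","email","uuid"] : List String)) : u = "string" := by
  rcases hu with h|h
  · exact h
  · rw [(strlike_iff u).mpr hm] at h
    exact absurd h (by decide)

-- two distinct collapsed-set elements with the same annotation share "Any"
theorem F_collision (u v : String)
    (hu : u = "string" ∨ pvStringTypes.contains u = false)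
    (hv : v = "string" ∨ pvStringTypes.contains v = false)
    (hne : u ≠ v) (heq : pvTypeToPython.getD u "Any" = pvTypeToPython.getD v "Any") :
    pvTypeToPython.getD u "Any" = "Any" := by
  rcases F_cases u with hc|hc|hc|hc|hc|hc|hc|hc
  · exact hc
  · -- F u = "Dict[str, Any]", u = "object"; then v = "object" = u, contradiction
    exfalso; apply hne
    rw [hc.2]
    rcases F_cases v with hd|hd|hd|hd|hd|hd|hd|hd <;>
      first
      | exact absurd (hd.symm.trans (heq.symm.trans hc.1)) (by decide)
      | exact absurd (hd.1.symm.trans (heq.symm.trans hc.1)) (by decide)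
      | exact hd.2.symm
  · exfalso; apply hne
    rw [hc.2]
    rcases F_cases v with hd|hd|hd|hd|hd|hd|hd|hd <;>
      first
      | exact absurd (hd.symm.trans (heq.symm.trans hc.1)) (by decide)
      | exact absurd (hd.1.symm.trans (heq.symm.trans hc.1)) (by decide)
      | exact hd.2.symm
  · exfalso; apply hne
    rw [hc.2]
    exact (F_float_inv v (heq.symm.trans hc.1).symm.symm).symm
  · exfalso; apply hne
    rw [hc.2]
    exact (F_int_inv v (heq ▸ hc.1 : pvTypeToPython.getD v "Any" = "int")).symm
  · -- F u = "str": both u and v are string subtypes, so both equal "string"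
    exfalso; apply hne
    have hv' : pvTypeToPython.getD v "Any" = "str" := heq ▸ hc.1
    rw [valid_str u hu hc.2, valid_str v hv (F_str_inv v hv')]
  · exfalso; apply hne
    rw [hc.2]
    rcases F_cases v with hd|hd|hd|hd|hd|hd|hd|hd <;>
      first
      | exact absurd (hd.symm.trans (heq.symm.trans hc.1)) (by decide)
      | exact absurd (hd.1.symm.trans (heq.symm.trans hc.1)) (by decide)
      | exact hd.2.symm
  · exfalso; apply hne
    rw [hc.2]
    rcases F_cases v with hd|hd|hd|hd|hd|hd|hd|hd <;>
      first
      | exact absurd (hd.symm.trans (heq.symm.trans hc.1)) (by decide)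
      | exact absurd (hd.1.symm.trans (heq.symm.trans hc.1)) (by decide)
      | exact hd.2.symm

theorem eq_singleton_of_nodup {α : Type} (l : List α) (a : α) (hnd : l.Nodup)
    (h : ∀ y, y ∈ l ↔ y = a) : l = [a] := by
  match l with
  | [] => exact absurd ((h a).mpr rfl) (List.not_mem_nil)
  | [x] => rw [(h x).mp (List.mem_cons_self)]
  | x :: z :: zs =>
    exfalso
    have hx : x = a := (h x).mp List.mem_cons_self
    have hz : z = a := (h z).mp (List.mem_cons_of_mem _ List.mem_cons_self)
    exact (List.nodup_cons.mp hnd).1 (by rw [hx, ← hz]; exact List.mem_cons_self)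

-- A's loop, with the pair state split into its two components
theorem foldA (l : List String) (c : PySem.Set String) (b : Bool) :
    l.foldl (fun (acc : PySem.Set String × Bool) t =>
        if pvStringTypes.contains t then (acc.1, true) else (PySem.Set.add acc.1 t, acc.2)) (c, b)
    = (l.foldl (fun s t => if pvStringTypes.contains t then s else PySem.Set.add s t) c,
       b || l.any (fun t => pvStringTypes.contains t)) := by
  induction l generalizing c b with
  | nil => simp
  | cons x xs ih =>
    by_cases hx : pvStringTypes.contains x = true
    · rw [List.foldl_cons, if_pos hx, ih, List.foldl_cons, if_pos hx, List.any_cons, hx]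
      simp
    · rw [List.foldl_cons, if_neg hx, ih, List.foldl_cons, if_neg hx, List.any_cons]
      rw [Bool.not_eq_true] at hx
      rw [hx]
      simp

-- membership and Nodup of the collapsed-set accumulator
theorem foldC (l : List String) (c : PySem.Set String) (hc : c.Nodup) :
    (l.foldl (fun s t => if pvStringTypes.contains t then s else PySem.Set.add s t) c).Nodup
    ∧ ∀ y, (y ∈ l.foldl (fun s t => if pvStringTypes.contains t then s else PySem.Set.add s t) c
        ↔ y ∈ c ∨ (y ∈ l ∧ pvStringTypes.contains y = false)) := by
  induction l generalizing c with
  | nil => simp [hc]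
  | cons x xs ih =>
    by_cases hx : pvStringTypes.contains x = true
    · rw [List.foldl_cons, if_pos hx]
      refine ⟨(ih c hc).1, fun y => ?_⟩
      rw [(ih c hc).2 y]
      constructor
      · rintro (h|⟨hm, hf⟩)
        · exact Or.inl h
        · exact Or.inr ⟨List.mem_cons_of_mem _ hm, hf⟩
      · rintro (h|⟨hm, hf⟩)
        · exact Or.inl h
        · rcases List.mem_cons.mp hm with heq|hm'
          · rw [heq, hx] at hf
            exact absurd hf (by decide)
          · exact Or.inr ⟨hm', hf⟩
    · rw [List.foldl_cons, if_neg hx]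
      have hnd' : (PySem.Set.add c x).Nodup := PySem.Set.nodup_add c x hc
      refine ⟨(ih _ hnd').1, fun y => ?_⟩
      rw [(ih _ hnd').2 y, PySem.Set.mem_add]
      rw [Bool.not_eq_true] at hx
      constructor
      · rintro ((h|rfl)|⟨hm, hf⟩)
        · exact Or.inl h
        · exact Or.inr ⟨List.mem_cons_self, hx⟩
        · exact Or.inr ⟨List.mem_cons_of_mem _ hm, hf⟩
      · rintro (h|⟨hm, hf⟩)
        · exact Or.inl (Or.inl h)
        · rcases List.mem_cons.mp hm with heq|hm'
          · exact Or.inl (Or.inr heq)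
          · exact Or.inr ⟨hm', hf⟩

-- the classification step: A's category set C and B's annotation set M give the same answer
theorem core2 (C M : List String) (hCnd : C.Nodup) (hMnd : M.Nodup) (hCne : C ≠ [])
    (hCvalid : ∀ t ∈ C, t = "string" ∨ pvStringTypes.contains t = false)
    (hMC : ∀ y, y ∈ M ↔ ∃ t ∈ C, y = pvTypeToPython.getD t "Any") :
    (if PySem.Set.equal C (PySem.Set.ofList ["integer","float"]) then "float"
     else if PySem.Set.equal C (PySem.Set.ofList ["integer"]) then "int"
     else if PySem.Set.equal C (PySem.Set.ofList ["float"]) then "float"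
     else if PySem.Set.len C = 1 then pvTypeToPython.getD (C.headD "") "Any"
     else "Any")
    = (if PySem.Set.equal M (PySem.Set.ofList ["int","float"]) then "float"
       else if PySem.Set.len M = 1 then M.headD ""
       else "Any") := by
  by_cases e1 : PySem.Set.equal C (PySem.Set.ofList ["integer","float"]) = true
  · rw [if_pos e1]
    rw [PySem.Set.equal_iff] at e1
    have b1 : PySem.Set.equal M (PySem.Set.ofList ["int","float"]) = true := by
      rw [PySem.Set.equal_iff]
      intro y
      rw [hMC y, PySem.Set.mem_ofList]
      constructor
      · rintro ⟨t, ht, rfl⟩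
        have := (e1 t).mp ht
        rw [PySem.Set.mem_ofList] at this
        simp only [List.mem_cons] at this ⊢
        rcases this with rfl|rfl|h
        · left; decide
        · right; left; decide
        · exact absurd h (by simp)
      · intro hy
        simp only [List.mem_cons] at hy
        rcases hy with rfl|rfl|hy
        · exact ⟨"integer", (e1 _).mpr (by rw [PySem.Set.mem_ofList]; simp), by decide⟩
        · exact ⟨"float", (e1 _).mpr (by rw [PySem.Set.mem_ofList]; simp), by decide⟩
        · exact absurd hy (by simp)
    rw [if_pos b1]
  rw [if_neg e1]
  by_cases e2 : PySem.Set.equal C (PySem.Set.ofList ["integer"]) = true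
  · rw [if_pos e2]
    rw [PySem.Set.equal_iff] at e2
    have hC : C = ["integer"] := by
      refine eq_singleton_of_nodup C _ hCnd fun y => ?_
      rw [e2 y, PySem.Set.mem_ofList, List.mem_singleton]
    have hM : M = ["int"] := by
      refine eq_singleton_of_nodup M _ hMnd fun y => ?_
      rw [hMC y, hC]
      constructor
      · rintro ⟨t, ht, rfl⟩; simp only [List.mem_singleton] at ht; subst ht; decide
      · rintro rfl; exact ⟨"integer", by simp, by decide⟩
    rw [hM]; decide
  rw [if_neg e2]
  by_cases e3 : PySem.Set.equal C (PySem.Set.ofList ["float"]) = true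
  · rw [if_pos e3]
    rw [PySem.Set.equal_iff] at e3
    have hC : C = ["float"] := by
      refine eq_singleton_of_nodup C _ hCnd fun y => ?_
      rw [e3 y, PySem.Set.mem_ofList, List.mem_singleton]
    have hM : M = ["float"] := by
      refine eq_singleton_of_nodup M _ hMnd fun y => ?_
      rw [hMC y, hC]
      constructor
      · rintro ⟨t, ht, rfl⟩; simp only [List.mem_singleton] at ht; subst ht; decide
      · rintro rfl; exact ⟨"float", by simp, by decide⟩
    rw [hM]; decide
  rw [if_neg e3]
  by_cases e4 : PySem.Set.len C = 1
  · rw [if_pos e4]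
    have hlen : C.length = 1 := by
      simp only [PySem.Set.len] at e4; exact_mod_cast e4
    obtain ⟨t, hC⟩ := List.length_eq_one_iff.mp hlen
    have hM : M = [pvTypeToPython.getD t "Any"] := by
      refine eq_singleton_of_nodup M _ hMnd fun y => ?_
      rw [hMC y, hC]
      constructor
      · rintro ⟨u, hu, rfl⟩; simp only [List.mem_singleton] at hu; subst hu; rfl
      · rintro rfl; exact ⟨t, by simp, rfl⟩
    have b1 : ¬ PySem.Set.equal M (PySem.Set.ofList ["int","float"]) = true := by
      intro hb
      rw [PySem.Set.equal_iff] at hb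
      have hi : ("int" : String) ∈ M := (hb _).mpr (by rw [PySem.Set.mem_ofList]; simp)
      have hf : ("float" : String) ∈ M := (hb _).mpr (by rw [PySem.Set.mem_ofList]; simp)
      rw [hM, List.mem_singleton] at hi hf
      rw [← hf] at hi
      exact absurd hi (by decide)
    rw [if_neg b1]
    have b2 : PySem.Set.len M = 1 := by rw [hM]; rfl
    rw [if_pos b2, hC, hM]
    rfl
  · rw [if_neg e4]
    -- C has at least two distinct elements
    obtain ⟨a, b, rest, hC⟩ : ∃ a b rest, C = a :: b :: rest := by
      match C with
      | [] => exact absurd rfl hCne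
      | [x] => exact absurd (by rw [PySem.Set.len]; rfl) e4
      | x :: z :: zs => exact ⟨x, z, zs, rfl⟩
    have hab : a ≠ b := by
      rw [hC] at hCnd
      intro h
      exact (List.nodup_cons.mp hCnd).1 (by rw [h]; exact List.mem_cons_self)
    have haC : a ∈ C := by rw [hC]; exact List.mem_cons_self
    have hbC : b ∈ C := by rw [hC]; exact List.mem_cons_of_mem _ List.mem_cons_self
    by_cases b1 : PySem.Set.equal M (PySem.Set.ofList ["int","float"]) = true
    · exfalso
      rw [PySem.Set.equal_iff] at b1
      apply e1
      rw [PySem.Set.equal_iff]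
      intro x
      rw [PySem.Set.mem_ofList]
      constructor
      · intro hx
        have hFx : pvTypeToPython.getD x "Any" ∈ M := (hMC _).mpr ⟨x, hx, rfl⟩
        have := (b1 _).mp hFx
        rw [PySem.Set.mem_ofList] at this
        simp only [List.mem_cons] at this ⊢
        rcases this with h|h|h
        · exact Or.inl (F_int_inv x h)
        · exact Or.inr (Or.inl (F_float_inv x h))
        · exact absurd h (by simp)
      · intro hx
        simp only [List.mem_cons] at hx
        rcases hx with rfl|rfl|hx
        · have : ("int" : String) ∈ M := (b1 _).mpr (by rw [PySem.Set.mem_ofList]; simp)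
          obtain ⟨t, ht, hFt⟩ := (hMC _).mp this
          rwa [F_int_inv t hFt.symm] at ht
        · have : ("float" : String) ∈ M := (b1 _).mpr (by rw [PySem.Set.mem_ofList]; simp)
          obtain ⟨t, ht, hFt⟩ := (hMC _).mp this
          rwa [F_float_inv t hFt.symm] at ht
        · exact absurd hx (by simp)
    · rw [if_neg b1]
      by_cases b2 : PySem.Set.len M = 1
      · rw [if_pos b2]
        have hlenM : M.length = 1 := by
          simp only [PySem.Set.len] at b2; exact_mod_cast b2
        obtain ⟨y0, hM⟩ := List.length_eq_one_iff.mp hlenM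
        have hFa : pvTypeToPython.getD a "Any" = y0 := by
          have := (hMC _).mpr ⟨a, haC, rfl⟩
          rwa [hM, List.mem_singleton] at this
        have hFb : pvTypeToPython.getD b "Any" = y0 := by
          have := (hMC _).mpr ⟨b, hbC, rfl⟩
          rwa [hM, List.mem_singleton] at this
        have hany : pvTypeToPython.getD a "Any" = "Any" :=
          F_collision a b (hCvalid a haC) (hCvalid b hbC) hab (by rw [hFa, hFb])
        rw [hM]
        show "Any" = y0
        rw [← hFa, hany]
      · rw [if_neg b2]

-- ===== VERDICT (by name: the statement is the Claim_ definition above) =====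
theorem suggest_python_type_py_spec : Claim_equal_suggest_python_type_py := by
  intro xs _
  unfold Spec_suggest_python_type_py suggest_python_type_py suggest_python_type_py_alt
  by_cases hreal : PySem.Set.diff (PySem.Set.ofList xs) (PySem.Set.ofList ["null"]) = []
  · simp [hreal]
  · simp only [if_neg hreal]
    set r := PySem.Set.diff (PySem.Set.ofList xs) (PySem.Set.ofList ["null"]) with hr
    have hrnd : r.Nodup := PySem.Set.nodup_diff _ _ (PySem.Set.nodup_ofList _)
    -- A's loop split into components
    rw [foldA r PySem.Set.empty false]
    have hempty : (PySem.Set.empty : PySem.Set String).Nodup := List.nodup_nil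
    obtain ⟨hC0nd, hC0mem⟩ := foldC r PySem.Set.empty hempty
    set C0 := r.foldl (fun s t => if pvStringTypes.contains t then s else PySem.Set.add s t)
      PySem.Set.empty with hC0
    set hS := r.any (fun t => pvStringTypes.contains t) with hSdef
    -- B's set comprehension as ofList of the mapped list
    rw [← PySem.Set.update_map_eq_foldl_add r (fun t => pvTypeToPython.getD t "Any") PySem.Set.empty,
      PySem.Set.update_empty]
    set M := PySem.Set.ofList (r.map (fun t => pvTypeToPython.getD t "Any")) with hMdef
    have hMnd : M.Nodup := PySem.Set.nodup_ofList _
    have hMmem : ∀ y, y ∈ M ↔ ∃ t ∈ r, y = pvTypeToPython.getD t "Any" := by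
      intro y
      rw [hMdef, PySem.Set.mem_ofList, List.mem_map]
      constructor
      · rintro ⟨t, ht, rfl⟩; exact ⟨t, ht, rfl⟩
      · rintro ⟨t, ht, rfl⟩; exact ⟨t, ht, rfl⟩
    -- the collapsed set C (components of the fold are C0 and false || hS = hS)
    simp only [Bool.false_or]
    set C : PySem.Set String := if hS then PySem.Set.add C0 "string" else C0 with hCdef
    have hCmem : ∀ y, y ∈ C ↔ (y ∈ r ∧ pvStringTypes.contains y = false)
        ∨ (hS = true ∧ y = "string") := by
      intro y
      rw [hCdef]
      by_cases hs : hS = true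
      · rw [if_pos hs, PySem.Set.mem_add, hC0mem y]
        simp only [PySem.Set.empty, List.not_mem_nil, false_or]
        constructor
        · rintro (h|h)
          · exact Or.inl h
          · exact Or.inr ⟨hs, h⟩
        · rintro (h|⟨_, h⟩)
          · exact Or.inl h
          · exact Or.inr h
      · rw [if_neg hs, hC0mem y]
        simp only [PySem.Set.empty, List.not_mem_nil, false_or]
        constructor
        · exact Or.inl
        · rintro (h|⟨h, _⟩)
          · exact h
          · exact absurd h hs
    have hCnd : C.Nodup := by
      rw [hCdef]
      by_cases hs : hS = true
      · rw [if_pos hs]; exact PySem.Set.nodup_add _ _ hC0nd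
      · rw [if_neg hs]; exact hC0nd
    have hCvalid : ∀ t ∈ C, t = "string" ∨ pvStringTypes.contains t = false := by
      intro t ht
      rcases (hCmem t).mp ht with ⟨_, h⟩|⟨_, h⟩
      · exact Or.inr h
      · exact Or.inl h
    have hCne : C ≠ [] := by
      obtain ⟨t, ht⟩ := List.exists_mem_of_ne_nil r hreal
      by_cases hst : pvStringTypes.contains t = true
      · have hs : hS = true := by
          rw [hSdef, List.any_eq_true]; exact ⟨t, ht, hst⟩
        have : ("string" : String) ∈ C := (hCmem _).mpr (Or.inr ⟨hs, rfl⟩)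
        exact List.ne_nil_of_mem this
      · have : t ∈ C := (hCmem _).mpr (Or.inl ⟨ht, by simpa using hst⟩)
        exact List.ne_nil_of_mem this
    have hMC : ∀ y, y ∈ M ↔ ∃ t ∈ C, y = pvTypeToPython.getD t "Any" := by
      intro y
      rw [hMmem y]
      constructor
      · rintro ⟨t, ht, rfl⟩
        by_cases hst : pvStringTypes.contains t = true
        · have hs : hS = true := by
            rw [hSdef, List.any_eq_true]; exact ⟨t, ht, hst⟩
          refine ⟨"string", (hCmem _).mpr (Or.inr ⟨hs, rfl⟩), ?_⟩
          rw [F_str t ((strlike_iff t).mp hst)]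
          decide
        · exact ⟨t, (hCmem _).mpr (Or.inl ⟨ht, by simpa using hst⟩), rfl⟩
      · rintro ⟨t, ht, rfl⟩
        rcases (hCmem t).mp ht with ⟨htr, _⟩|⟨hs, rfl⟩
        · exact ⟨t, htr, rfl⟩
        · rw [hSdef, List.any_eq_true] at hs
          obtain ⟨u, hu, hsu⟩ := hs
          refine ⟨u, hu, ?_⟩
          rw [F_str u ((strlike_iff u).mp hsu)]
          decide
    exact core2 C M hCnd hMnd hCne hCvalid hMC
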